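-- pv_equiv track=rewrite | github.com/tonipetergugic/immusic | analysis_engine/change_intensity.py | _resolve_feature_group_indices
-- ===== SOURCE A (Python) =====
-- ENERGY_FEATURE_NAMES = {
--     "rms_mean",
--     "low_band_energy_mean",
--     "mid_band_energy_mean",
--     "high_band_energy_mean",
-- }
--
-- RHYTHMIC_FEATURE_NAMES = {
--     "onset_strength_mean",
--     "zero_crossing_rate_mean",
-- }
--
-- SPECTRAL_FEATURE_PREFIXES = (
--     "spectral_",
--     "mfcc_",
-- )
--
-- def _resolve_feature_group_indices(feature_names: list[str]) -> tuple[list[int], list[int], list[int]]: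
--     energy_indices: list[int] = []
--     spectral_indices: list[int] = []
--     rhythmic_indices: list[int] = []
--
--     for index, name in enumerate(feature_names):
--         if name in ENERGY_FEATURE_NAMES:
--             energy_indices.append(index)
--             continue
--
--         if name in RHYTHMIC_FEATURE_NAMES:
--             rhythmic_indices.append(index)
--             continue
--
--         if name.startswith(SPECTRAL_FEATURE_PREFIXES):
--             spectral_indices.append(index)
--             continue
--
--     return energy_indices, spectral_indices, rhythmic_indices
-- ===== SOURCE B (Python) =====
-- ENERGY_FEATURE_NAMES = {
--     "rms_mean",
--     "low_band_energy_mean",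
--     "mid_band_energy_mean",
--     "high_band_energy_mean",
-- }
--
-- RHYTHMIC_FEATURE_NAMES = {
--     "onset_strength_mean",
--     "zero_crossing_rate_mean",
-- }
--
-- SPECTRAL_FEATURE_PREFIXES = (
--     "spectral_",
--     "mfcc_",
-- )
--
-- def _resolve_feature_group_indices(feature_names):
--     indexed = list(enumerate(feature_names))
--     energy = [i for i, n in indexed if n in ENERGY_FEATURE_NAMES]
--     spectral = [i for i, n in indexed if n.startswith(SPECTRAL_FEATURE_PREFIXES)]
--     rhythmic = [i for i, n in indexed if n in RHYTHMIC_FEATURE_NAMES]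
--     return energy, spectral, rhythmic
-- ===== Notes on version B (the rewrite author's own statement) =====
-- stated objective: simpler
-- what changed: Replaces the single stateful priority-chain loop over three mutable accumulators with three independent declarative filters over enumerate(feature_names); correctness of dropping the priority guards rests on the proved fact that energy/rhythmic names never start with a spectral prefix.
import Mathlib
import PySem

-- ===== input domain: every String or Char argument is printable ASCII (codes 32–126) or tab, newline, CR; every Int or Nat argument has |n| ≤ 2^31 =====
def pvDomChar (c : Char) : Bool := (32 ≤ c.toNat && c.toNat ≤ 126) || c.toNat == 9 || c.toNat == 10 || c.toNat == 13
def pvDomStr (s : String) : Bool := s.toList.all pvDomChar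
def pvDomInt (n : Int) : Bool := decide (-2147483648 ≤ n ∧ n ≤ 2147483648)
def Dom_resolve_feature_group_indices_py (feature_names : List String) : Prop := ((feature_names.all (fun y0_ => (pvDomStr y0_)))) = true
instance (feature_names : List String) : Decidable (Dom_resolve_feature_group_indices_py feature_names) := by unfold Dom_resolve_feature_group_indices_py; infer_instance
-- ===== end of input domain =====

-- B replaces A's single priority-chain loop with three independent filters over enumerate (simpler, same O(n)).


-- ===== PORT A =====
-- module constants shared by both ports
def ENERGY_FEATURE_NAMES : List String :=
  ["rms_mean", "low_band_energy_mean", "mid_band_energy_mean", "high_band_energy_mean"]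

def RHYTHMIC_FEATURE_NAMES : List String :=
  ["onset_strength_mean", "zero_crossing_rate_mean"]

-- name.startswith(SPECTRAL_FEATURE_PREFIXES): True iff it starts with any prefix of the tuple
def startsSpectral (name : String) : Bool :=
  PySem.Str.startswith name "spectral_" || PySem.Str.startswith name "mfcc_"

-- A: one pass over enumerate(feature_names), a priority chain appending to three accumulators
def resolve_feature_group_indices_py (feature_names : List String) : List Int × List Int × List Int :=
  (PySem.List.enumerate feature_names).foldl
    (fun (acc : List Int × List Int × List Int) p =>
      if ENERGY_FEATURE_NAMES.contains p.2 then (acc.1 ++ [p.1], acc.2.1, acc.2.2)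
      else if RHYTHMIC_FEATURE_NAMES.contains p.2 then (acc.1, acc.2.1, acc.2.2 ++ [p.1])
      else if startsSpectral p.2 then (acc.1, acc.2.1 ++ [p.1], acc.2.2)
      else acc)
    ([], [], [])

-- ===== PORT B =====
-- B: three independent filters over the enumerated list
def resolve_feature_group_indices_py_alt (feature_names : List String) : List Int × List Int × List Int :=
  let indexed := PySem.List.enumerate feature_names
  ((indexed.filter (fun p => ENERGY_FEATURE_NAMES.contains p.2)).map (·.1),
   (indexed.filter (fun p => startsSpectral p.2)).map (·.1),
   (indexed.filter (fun p => RHYTHMIC_FEATURE_NAMES.contains p.2)).map (·.1))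

-- ===== PRECONDITION & SPEC =====
def Spec_resolve_feature_group_indices_py (feature_names : List String) (out : List Int × List Int × List Int) : Prop := out = resolve_feature_group_indices_py_alt feature_names
instance (feature_names : List String) (out : List Int × List Int × List Int) : Decidable (Spec_resolve_feature_group_indices_py feature_names out) := by unfold Spec_resolve_feature_group_indices_py; infer_instance

-- ===== CLAIM (what is proved, stated in full; the proofs are below) =====
def Claim_equal_resolve_feature_group_indices_py : Prop := ∀ (feature_names : List String), Dom_resolve_feature_group_indices_py feature_names → Spec_resolve_feature_group_indices_py feature_names (resolve_feature_group_indices_py feature_names)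

-- ===== LEMMAS AND PROOFS =====

-- the groups are disjoint: an energy name is neither rhythmic nor spectral-prefixed
theorem energy_disjoint (n : String) (h : n ∈ ENERGY_FEATURE_NAMES) :
    n ∉ RHYTHMIC_FEATURE_NAMES ∧ startsSpectral n = false := by
  simp only [ENERGY_FEATURE_NAMES, List.mem_cons, List.not_mem_nil, or_false] at h
  rcases h with h | h | h | h <;> subst h <;> exact ⟨by decide, by decide⟩

-- a rhythmic name is not spectral-prefixed
theorem rhythmic_not_spectral (n : String) (h : n ∈ RHYTHMIC_FEATURE_NAMES) :
    startsSpectral n = false := by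
  simp only [RHYTHMIC_FEATURE_NAMES, List.mem_cons, List.not_mem_nil, or_false] at h
  rcases h with h | h <;> subst h <;> decide

-- loop invariant: A's fold over any enumerated tail equals the three filters appended to the accumulators
theorem loop_eq (l : List (Int × String)) (e s r : List Int) :
    l.foldl
      (fun (acc : List Int × List Int × List Int) p =>
        if p.2 ∈ ENERGY_FEATURE_NAMES then (acc.1 ++ [p.1], acc.2.1, acc.2.2)
        else if p.2 ∈ RHYTHMIC_FEATURE_NAMES then (acc.1, acc.2.1, acc.2.2 ++ [p.1])
        else if startsSpectral p.2 then (acc.1, acc.2.1 ++ [p.1], acc.2.2)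
        else acc)
      (e, s, r)
    = (e ++ (l.filter (fun p => decide (p.2 ∈ ENERGY_FEATURE_NAMES))).map (·.1),
       s ++ (l.filter (fun p => startsSpectral p.2)).map (·.1),
       r ++ (l.filter (fun p => decide (p.2 ∈ RHYTHMIC_FEATURE_NAMES))).map (·.1)) := by
  induction l generalizing e s r with
  | nil => simp
  | cons p l ih =>
    by_cases hE : p.2 ∈ ENERGY_FEATURE_NAMES
    · obtain ⟨hR, hS⟩ := energy_disjoint p.2 hE
      simp [hE, hR, hS, ih]
    · by_cases hR : p.2 ∈ RHYTHMIC_FEATURE_NAMES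
      · have hS := rhythmic_not_spectral p.2 hR
        simp [hE, hR, hS, ih]
      · by_cases hS : startsSpectral p.2 = true
        · simp [hE, hR, hS, ih]
        · simp [hE, hR, hS, ih]

-- ===== VERDICT (by name: the statement is the Claim_ definition above) =====
theorem resolve_feature_group_indices_py_spec : Claim_equal_resolve_feature_group_indices_py := by
  intro feature_names _
  show resolve_feature_group_indices_py feature_names = resolve_feature_group_indices_py_alt feature_names
  unfold resolve_feature_group_indices_py resolve_feature_group_indices_py_alt
  simpa using loop_eq (PySem.List.enumerate feature_names) [] [] []
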